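-- pv_equiv track=rewrite | github.com/powershang/realtek_pc | NonNX/DDR/ddr_register_compare_cli.py | compare_single_rank_mr
-- ===== SOURCE A (Python) =====
-- def compare_single_rank_mr(mr1, mr2):
--     """
--     Compare MR values for a single rank.
--
--     Args:
--         mr1: File 1 MR values {mr_number: mr_value}
--         mr2: File 2 MR values {mr_number: mr_value}
--
--     Returns:
--         {
--             'only_in_file1': [(mr_num, value), ...],
--             'only_in_file2': [(mr_num, value), ...],
--             'value_diff': [(mr_num, val1, val2), ...],
--             'same': [(mr_num, value), ...]
--         }
--     """
--     all_mr_nums = sorted(set(mr1.keys()) | set(mr2.keys()))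
--
--     result = {
--         'only_in_file1': [],
--         'only_in_file2': [],
--         'value_diff': [],
--         'same': []
--     }
--
--     for mr_num in all_mr_nums:
--         in_file1 = mr_num in mr1
--         in_file2 = mr_num in mr2
--
--         if in_file1 and not in_file2:
--             result['only_in_file1'].append((mr_num, mr1[mr_num]))
--         elif in_file2 and not in_file1:
--             result['only_in_file2'].append((mr_num, mr2[mr_num]))
--         else:
--             if mr1[mr_num] != mr2[mr_num]:
--                 result['value_diff'].append((mr_num, mr1[mr_num], mr2[mr_num]))
--             else:
--                 result['same'].append((mr_num, mr1[mr_num]))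
--
--     return result
-- ===== SOURCE B (Python) =====
-- def compare_single_rank_mr(mr1, mr2):
--     """Set-algebra re-implementation: compute the three key groups first,
--     then build each bucket independently from its own sorted key list."""
--     k1, k2 = set(mr1), set(mr2)
--     only1 = sorted(k1 - k2)
--     only2 = sorted(k2 - k1)
--     common = sorted(k1 & k2)
--     return {
--         'only_in_file1': [(k, mr1[k]) for k in only1],
--         'only_in_file2': [(k, mr2[k]) for k in only2],
--         'value_diff': [(k, mr1[k], mr2[k]) for k in common if mr1[k] != mr2[k]],
--         'same': [(k, mr1[k]) for k in common if mr1[k] == mr2[k]],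
--     }
-- ===== Notes on version B (the rewrite author's own statement) =====
-- stated objective: alternative
-- what changed: Instead of one merged pass over the sorted key union dispatching each key into one of four buckets, B computes the three key groups by set algebra (k1-k2, k2-k1, k1&k2), sorts each group independently, and builds every bucket with its own comprehension.
import Mathlib
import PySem

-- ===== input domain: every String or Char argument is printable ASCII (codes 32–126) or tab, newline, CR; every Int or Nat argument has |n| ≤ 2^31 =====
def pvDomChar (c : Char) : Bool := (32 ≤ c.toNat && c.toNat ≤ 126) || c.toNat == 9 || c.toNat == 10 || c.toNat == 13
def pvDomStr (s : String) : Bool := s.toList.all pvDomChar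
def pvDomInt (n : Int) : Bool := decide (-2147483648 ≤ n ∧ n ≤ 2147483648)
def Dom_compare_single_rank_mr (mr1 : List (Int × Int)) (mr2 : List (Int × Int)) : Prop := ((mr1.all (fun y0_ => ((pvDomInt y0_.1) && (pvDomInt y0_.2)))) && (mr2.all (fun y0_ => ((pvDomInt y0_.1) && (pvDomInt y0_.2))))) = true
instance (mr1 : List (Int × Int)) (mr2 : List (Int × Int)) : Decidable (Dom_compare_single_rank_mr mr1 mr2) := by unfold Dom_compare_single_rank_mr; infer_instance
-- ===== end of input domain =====

-- B rebuilds the result by set algebra on the key groups (k1-k2, k2-k1, k1&k2), each bucket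
-- from its own sorted key list, instead of A's single merged dispatch pass; objective: alternative.

-- ===== PORT A =====
-- first-match association lookup = Python dict lookup mr[k]; the default 0 is never
-- reached on the paths the ports take it (every lookup is guarded by key membership)
def pvLookup : List (Int × Int) → Int → Int
  | [], _ => 0
  | (a, b) :: t, k => if a = k then b else pvLookup t k

-- the body of A's for-loop over all_mr_nums; state = the four result buckets
def pvStepA (mr1 mr2 : List (Int × Int))
    (r : List (List Int) × List (List Int) × List (List Int) × List (List Int)) (mr_num : Int) :
    List (List Int) × List (List Int) × List (List Int) × List (List Int) :=
  let in_file1 := decide (mr_num ∈ mr1.map Prod.fst)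
  let in_file2 := decide (mr_num ∈ mr2.map Prod.fst)
  if in_file1 && !in_file2 then
    (r.1 ++ [[mr_num, pvLookup mr1 mr_num]], r.2.1, r.2.2.1, r.2.2.2)
  else if in_file2 && !in_file1 then
    (r.1, r.2.1 ++ [[mr_num, pvLookup mr2 mr_num]], r.2.2.1, r.2.2.2)
  else if pvLookup mr1 mr_num ≠ pvLookup mr2 mr_num then
    (r.1, r.2.1, r.2.2.1 ++ [[mr_num, pvLookup mr1 mr_num, pvLookup mr2 mr_num]], r.2.2.2)
  else
    (r.1, r.2.1, r.2.2.1, r.2.2.2 ++ [[mr_num, pvLookup mr1 mr_num]])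

def compare_single_rank_mr (mr1 : List (Int × Int)) (mr2 : List (Int × Int)) : List (String × List (List Int)) :=
  let all_mr_nums := PySem.List.sorted
    (PySem.Set.union (PySem.Set.ofList (mr1.map Prod.fst)) (mr2.map Prod.fst)) (fun x => x) false
  let r := all_mr_nums.foldl (pvStepA mr1 mr2) ([], [], [], [])
  [("only_in_file1", r.1), ("only_in_file2", r.2.1), ("value_diff", r.2.2.1), ("same", r.2.2.2)]

-- ===== PORT B =====
def compare_single_rank_mr_alt (mr1 : List (Int × Int)) (mr2 : List (Int × Int)) : List (String × List (List Int)) :=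
  let k1 := PySem.Set.ofList (mr1.map Prod.fst)
  let k2 := PySem.Set.ofList (mr2.map Prod.fst)
  let only1 := PySem.List.sorted (PySem.Set.diff k1 k2) (fun x => x) false
  let only2 := PySem.List.sorted (PySem.Set.diff k2 k1) (fun x => x) false
  let common := PySem.List.sorted (PySem.Set.inter k1 k2) (fun x => x) false
  [("only_in_file1", only1.map (fun k => [k, pvLookup mr1 k])),
   ("only_in_file2", only2.map (fun k => [k, pvLookup mr2 k])),
   ("value_diff", (common.filter (fun k => pvLookup mr1 k ≠ pvLookup mr2 k)).map
      (fun k => [k, pvLookup mr1 k, pvLookup mr2 k])),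
   ("same", (common.filter (fun k => pvLookup mr1 k = pvLookup mr2 k)).map
      (fun k => [k, pvLookup mr1 k]))]

-- ===== PRECONDITION & SPEC =====
def Spec_compare_single_rank_mr (mr1 : List (Int × Int)) (mr2 : List (Int × Int)) (out : List (String × List (List Int))) : Prop := out = compare_single_rank_mr_alt mr1 mr2
instance (mr1 : List (Int × Int)) (mr2 : List (Int × Int)) (out : List (String × List (List Int))) : Decidable (Spec_compare_single_rank_mr mr1 mr2 out) := by unfold Spec_compare_single_rank_mr; infer_instance

-- ===== CLAIM (what is proved, stated in full; the proofs are below) =====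
def Claim_equal_compare_single_rank_mr : Prop := ∀ (mr1 : List (Int × Int)) (mr2 : List (Int × Int)), Dom_compare_single_rank_mr mr1 mr2 → Spec_compare_single_rank_mr mr1 mr2 (compare_single_rank_mr mr1 mr2)

-- ===== LEMMAS AND PROOFS =====

-- the four dispatch predicates of A's loop
def pvP1 (mr1 mr2 : List (Int × Int)) (k : Int) : Bool :=
  decide (k ∈ mr1.map Prod.fst) && !decide (k ∈ mr2.map Prod.fst)
def pvP2 (mr1 mr2 : List (Int × Int)) (k : Int) : Bool :=
  decide (k ∈ mr2.map Prod.fst) && !decide (k ∈ mr1.map Prod.fst)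
def pvP3 (mr1 mr2 : List (Int × Int)) (k : Int) : Bool :=
  !pvP1 mr1 mr2 k && (!pvP2 mr1 mr2 k && !decide (pvLookup mr1 k = pvLookup mr2 k))
def pvP4 (mr1 mr2 : List (Int × Int)) (k : Int) : Bool :=
  !pvP1 mr1 mr2 k && (!pvP2 mr1 mr2 k && decide (pvLookup mr1 k = pvLookup mr2 k))

theorem pvFoldA (mr1 mr2 : List (Int × Int)) (l : List Int)
    (a b c d : List (List Int)) :
    l.foldl (pvStepA mr1 mr2) (a, b, c, d) =
      (a ++ (l.filter (pvP1 mr1 mr2)).map (fun k => [k, pvLookup mr1 k]),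
       b ++ (l.filter (pvP2 mr1 mr2)).map (fun k => [k, pvLookup mr2 k]),
       c ++ (l.filter (pvP3 mr1 mr2)).map (fun k => [k, pvLookup mr1 k, pvLookup mr2 k]),
       d ++ (l.filter (pvP4 mr1 mr2)).map (fun k => [k, pvLookup mr1 k])) := by
  induction l generalizing a b c d with
  | nil => simp
  | cons x t ih =>
    simp only [List.foldl_cons, List.filter_cons]
    by_cases h1 : decide (x ∈ mr1.map Prod.fst) && !decide (x ∈ mr2.map Prod.fst)
    · rw [show pvStepA mr1 mr2 (a, b, c, d) x
          = (a ++ [[x, pvLookup mr1 x]], b, c, d) by simp [pvStepA, h1]]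
      rw [ih]
      simp [pvP1, pvP2, pvP3, pvP4, h1]
      simp only [Bool.and_eq_true] at h1
      simp [h1.1]
    · by_cases h2 : decide (x ∈ mr2.map Prod.fst) && !decide (x ∈ mr1.map Prod.fst)
      · rw [show pvStepA mr1 mr2 (a, b, c, d) x
            = (a, b ++ [[x, pvLookup mr2 x]], c, d) by simp [pvStepA, h1, h2]]
        rw [ih]
        simp [pvP1, pvP2, pvP3, pvP4, h1, h2]
      · by_cases h3 : pvLookup mr1 x = pvLookup mr2 x
        · rw [show pvStepA mr1 mr2 (a, b, c, d) x
              = (a, b, c, d ++ [[x, pvLookup mr1 x]]) by simp [pvStepA, h1, h2, h3]]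
          rw [ih]
          simp [pvP1, pvP2, pvP3, pvP4, h1, h2, h3]
        · rw [show pvStepA mr1 mr2 (a, b, c, d) x
              = (a, b, c ++ [[x, pvLookup mr1 x, pvLookup mr2 x]], d) by simp [pvStepA, h1, h2, h3]]
          rw [ih]
          simp [pvP1, pvP2, pvP3, pvP4, h1, h2, h3]

-- the sorted union of the key sets: strictly increasing and nodup
theorem pvAll_sorted_lt (mr1 mr2 : List (Int × Int)) :
    (PySem.List.sorted
      (PySem.Set.union (PySem.Set.ofList (mr1.map Prod.fst)) (mr2.map Prod.fst)) (fun x => x) false).Pairwise (· < ·) := by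
  have hnd : (PySem.Set.union (PySem.Set.ofList (mr1.map Prod.fst)) (mr2.map Prod.fst)).Nodup :=
    PySem.Set.nodup_union _ _ (PySem.Set.nodup_ofList _)
  have hperm := PySem.List.sorted_perm
    (PySem.Set.union (PySem.Set.ofList (mr1.map Prod.fst)) (mr2.map Prod.fst)) (fun x => x) false
  have hle := PySem.List.sorted_pairwise
    (PySem.Set.union (PySem.Set.ofList (mr1.map Prod.fst)) (mr2.map Prod.fst)) (fun x => x)
  have hnd' : (PySem.List.sorted
      (PySem.Set.union (PySem.Set.ofList (mr1.map Prod.fst)) (mr2.map Prod.fst)) (fun x => x) false).Nodup :=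
    hperm.nodup_iff.mpr hnd
  exact (hle.and hnd').imp (fun h => lt_of_le_of_ne h.1 h.2)

-- a strictly-increasing filtered slice of the sorted union IS sorted(<the set with same membership>)
theorem pvSorted_filter (X : List Int) (mr1 mr2 : List (Int × Int)) (p : Int → Bool)
    (hX : X.Nodup)
    (hmem : ∀ k, k ∈ X ↔ k ∈ (PySem.List.sorted
      (PySem.Set.union (PySem.Set.ofList (mr1.map Prod.fst)) (mr2.map Prod.fst)) (fun x => x) false).filter p) :
    PySem.List.sorted X (fun x => x) false
      = (PySem.List.sorted
      (PySem.Set.union (PySem.Set.ofList (mr1.map Prod.fst)) (mr2.map Prod.fst)) (fun x => x) false).filter p := by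
  apply PySem.List.sorted_eq_of_perm_of_pairwise_lt
  · apply (List.perm_ext_iff_of_nodup _ hX).mpr
    · intro k; rw [hmem]
    · exact ((pvAll_sorted_lt mr1 mr2).imp ne_of_lt).filter p
  · exact (pvAll_sorted_lt mr1 mr2).filter p

theorem pvMem_all (mr1 mr2 : List (Int × Int)) (k : Int) :
    k ∈ (PySem.List.sorted
      (PySem.Set.union (PySem.Set.ofList (mr1.map Prod.fst)) (mr2.map Prod.fst)) (fun x => x) false)
      ↔ k ∈ mr1.map Prod.fst ∨ k ∈ mr2.map Prod.fst := by
  rw [PySem.List.mem_sorted, PySem.Set.mem_union, PySem.Set.mem_ofList]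

theorem pvBucketOnly1 (mr1 mr2 : List (Int × Int)) :
    PySem.List.sorted (PySem.Set.diff (PySem.Set.ofList (mr1.map Prod.fst)) (PySem.Set.ofList (mr2.map Prod.fst))) (fun x => x) false
      = (PySem.List.sorted
      (PySem.Set.union (PySem.Set.ofList (mr1.map Prod.fst)) (mr2.map Prod.fst)) (fun x => x) false).filter (pvP1 mr1 mr2) := by
  apply pvSorted_filter
  · exact PySem.Set.nodup_diff _ _ (PySem.Set.nodup_ofList _)
  · intro k
    simp only [PySem.Set.mem_diff, PySem.Set.mem_ofList, List.mem_filter, pvMem_all, pvP1,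
      Bool.and_eq_true, Bool.not_eq_true', decide_eq_false_iff_not, decide_eq_true_eq]
    tauto

theorem pvBucketOnly2 (mr1 mr2 : List (Int × Int)) :
    PySem.List.sorted (PySem.Set.diff (PySem.Set.ofList (mr2.map Prod.fst)) (PySem.Set.ofList (mr1.map Prod.fst))) (fun x => x) false
      = (PySem.List.sorted
      (PySem.Set.union (PySem.Set.ofList (mr1.map Prod.fst)) (mr2.map Prod.fst)) (fun x => x) false).filter (pvP2 mr1 mr2) := by
  apply pvSorted_filter
  · exact PySem.Set.nodup_diff _ _ (PySem.Set.nodup_ofList _)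
  · intro k
    simp only [PySem.Set.mem_diff, PySem.Set.mem_ofList, List.mem_filter, pvMem_all, pvP2,
      Bool.and_eq_true, Bool.not_eq_true', decide_eq_false_iff_not, decide_eq_true_eq]
    tauto

theorem pvCommon (mr1 mr2 : List (Int × Int)) :
    PySem.List.sorted (PySem.Set.inter (PySem.Set.ofList (mr1.map Prod.fst)) (PySem.Set.ofList (mr2.map Prod.fst))) (fun x => x) false
      = (PySem.List.sorted
      (PySem.Set.union (PySem.Set.ofList (mr1.map Prod.fst)) (mr2.map Prod.fst)) (fun x => x) false).filter
        (fun k => decide (k ∈ mr1.map Prod.fst) && decide (k ∈ mr2.map Prod.fst)) := by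
  apply pvSorted_filter
  · exact PySem.Set.nodup_inter _ _ (PySem.Set.nodup_ofList _)
  · intro k
    simp only [PySem.Set.mem_inter, PySem.Set.mem_ofList, List.mem_filter, pvMem_all,
      Bool.and_eq_true, decide_eq_true_eq]
    tauto

theorem pvBucket34 (mr1 mr2 : List (Int × Int)) (q : Int → Bool)
    (h3 : ∀ k, (k ∈ mr1.map Prod.fst ∨ k ∈ mr2.map Prod.fst) →
      (q k && (decide (k ∈ mr1.map Prod.fst) && decide (k ∈ mr2.map Prod.fst)))
        = (!pvP1 mr1 mr2 k && (!pvP2 mr1 mr2 k && q k))) :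
    (PySem.List.sorted (PySem.Set.inter (PySem.Set.ofList (mr1.map Prod.fst)) (PySem.Set.ofList (mr2.map Prod.fst))) (fun x => x) false).filter q
      = (PySem.List.sorted
      (PySem.Set.union (PySem.Set.ofList (mr1.map Prod.fst)) (mr2.map Prod.fst)) (fun x => x) false).filter
        (fun k => !pvP1 mr1 mr2 k && (!pvP2 mr1 mr2 k && q k)) := by
  rw [pvCommon, List.filter_filter]
  apply List.filter_congr
  intro k hk
  exact h3 k ((pvMem_all mr1 mr2 k).1 hk)

-- ===== VERDICT (by name: the statement is the Claim_ definition above) =====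
theorem compare_single_rank_mr_spec : Claim_equal_compare_single_rank_mr := by
  intro mr1 mr2 _
  unfold Spec_compare_single_rank_mr compare_single_rank_mr compare_single_rank_mr_alt
  simp only []
  rw [pvFoldA, pvBucketOnly1, pvBucketOnly2,
    pvBucket34 mr1 mr2 (fun k => decide ¬(pvLookup mr1 k = pvLookup mr2 k)) ?_,
    pvBucket34 mr1 mr2 (fun k => decide (pvLookup mr1 k = pvLookup mr2 k)) ?_]
  · simp only [List.nil_append, decide_not]; rfl
  all_goals
    intro k hk
    by_cases hk1 : k ∈ mr1.map Prod.fst <;> by_cases hk2 : k ∈ mr2.map Prod.fst <;>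
      simp_all [pvP1, pvP2]
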